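-- pv_equiv track=rewrite | github.com/danpro3/advent-of-code | 2025/06_math_homework.py | sum_the_columns
-- ===== SOURCE A (Python) =====
-- def sum_the_columns(grid,ops):
--     total = 0
--     for c,op in enumerate(ops):
--         if op == '+':
--             quicktotal = 0
--             for r in range(len(grid)):
--                 quicktotal += grid[r][c]
--         else: # '*'
--             quicktotal = 1
--             for r in range(len(grid)):
--                 quicktotal *= grid[r][c]
--         total += quicktotal
--     return total
-- ===== SOURCE B (Python) =====
-- def sum_the_columns(grid, ops):
--     acc = [0 if op == '+' else 1 for op in ops]
--     for row in grid:
--         acc = [a + x if op == '+' else a * x for a, x, op in zip(acc, row, ops)]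
--     return sum(acc)
-- ===== Notes on version B (the rewrite author's own statement) =====
-- stated objective: alternative
-- what changed: Inverts the loop nesting: instead of a scalar accumulator per column with an inner loop over rows, B makes one row-major pass maintaining a vector of per-column running accumulators (0 for '+', 1 for '*') and finally sums the vector.
import Mathlib
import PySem

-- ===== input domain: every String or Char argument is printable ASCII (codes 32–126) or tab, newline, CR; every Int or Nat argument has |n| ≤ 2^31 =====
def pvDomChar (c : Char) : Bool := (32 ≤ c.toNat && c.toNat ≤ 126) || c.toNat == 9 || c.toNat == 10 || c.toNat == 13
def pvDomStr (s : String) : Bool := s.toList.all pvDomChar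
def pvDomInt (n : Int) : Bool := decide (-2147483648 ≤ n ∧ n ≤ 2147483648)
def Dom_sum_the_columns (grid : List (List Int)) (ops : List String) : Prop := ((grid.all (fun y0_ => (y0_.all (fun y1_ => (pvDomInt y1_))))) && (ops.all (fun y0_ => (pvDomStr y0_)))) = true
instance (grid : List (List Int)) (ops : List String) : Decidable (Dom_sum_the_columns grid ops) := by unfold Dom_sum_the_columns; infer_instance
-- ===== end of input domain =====

-- B inverts the loop nesting: one row-major pass over a vector of per-column accumulators instead of per-column inner row loops; same cost, structurally different.


-- ===== PORT A =====
def sum_the_columns (grid : List (List Int)) (ops : List String) : Int :=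
  (PySem.List.enumerate ops 0).foldl (fun total co =>
    total +
      (if co.2 == "+" then
        (PySem.List.pyRange 0 grid.length 1).foldl
          (fun quicktotal r => quicktotal + PySem.List.pyGetD (PySem.List.pyGetD grid r []) co.1 0) 0
      else
        (PySem.List.pyRange 0 grid.length 1).foldl
          (fun quicktotal r => quicktotal * PySem.List.pyGetD (PySem.List.pyGetD grid r []) co.1 0) 1)) 0

-- ===== PORT B =====
def sum_the_columns_alt (grid : List (List Int)) (ops : List String) : Int :=
  (grid.foldl (fun acc row =>
      (acc.zip (row.zip ops)).map
        (fun t => if t.2.2 == "+" then t.1 + t.2.1 else t.1 * t.2.1))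
    (ops.map (fun op => if op == "+" then (0 : Int) else 1))).sum

-- ===== PRECONDITION & SPEC =====
-- Pre_ excludes exactly the inputs where A raises IndexError: some row shorter than ops.
def Pre_sum_the_columns (grid : List (List Int)) (ops : List String) : Prop :=
  ∀ row ∈ grid, ops.length ≤ row.length
instance (grid : List (List Int)) (ops : List String) : Decidable (Pre_sum_the_columns grid ops) := by
  unfold Pre_sum_the_columns; infer_instance
def pvWitness_sum_the_columns : List (List Int) × List String := ([[1, 2], [3, 4]], ["+", "*"])

def Spec_sum_the_columns (grid : List (List Int)) (ops : List String) (out : Int) : Prop := out = sum_the_columns_alt grid ops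
instance (grid : List (List Int)) (ops : List String) (out : Int) : Decidable (Spec_sum_the_columns grid ops out) := by unfold Spec_sum_the_columns; infer_instance

-- ===== CLAIM (what is proved, stated in full; the proofs are below) =====
def Claim_equal_sum_the_columns : Prop := ∀ (grid : List (List Int)) (ops : List String), Dom_sum_the_columns grid ops → Pre_sum_the_columns grid ops → Spec_sum_the_columns grid ops (sum_the_columns grid ops)

-- ===== LEMMAS AND PROOFS =====
-- per-column update: combining the running accumulator q with row's entry at column c
def colF (op : String) (c : Nat) (q : Int) (row : List Int) : Int :=
  if op == "+" then q + row.getD c 0 else q * row.getD c 0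

lemma map_eq_map_range {α β : Type} (f : α → β) (xs : List α) (d : α) :
    xs.map f = (List.range xs.length).map (fun k => f (xs.getD k d)) := by
  apply List.ext_getElem
  · simp
  · intro k h1 h2
    simp only [List.length_map] at h1
    simp [List.getElem?_eq_getElem h1]

lemma step_eq (ops : List String) (v : Nat → Int) (row : List Int)
    (h : ops.length ≤ row.length) :
    ((((List.range ops.length).map v).zip (row.zip ops)).map
        (fun t => if t.2.2 == "+" then t.1 + t.2.1 else t.1 * t.2.1))
      = (List.range ops.length).map (fun k => colF (ops.getD k "") k (v k) row) := by
  apply List.ext_getElem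
  · simp; omega
  · intro k h1 h2
    simp only [List.length_map, List.length_range] at h2
    simp [List.getElem_zip, colF, List.getElem?_eq_getElem h2,
      List.getElem?_eq_getElem (show k < row.length by omega)]

lemma fold_eq (ops : List String) :
    ∀ (grid : List (List Int)), (∀ row ∈ grid, ops.length ≤ row.length) → ∀ (v : Nat → Int),
      grid.foldl (fun acc row =>
          (acc.zip (row.zip ops)).map
            (fun t => if t.2.2 == "+" then t.1 + t.2.1 else t.1 * t.2.1))
        ((List.range ops.length).map v)
      = (List.range ops.length).map (fun k => grid.foldl (colF (ops.getD k "") k) (v k)) := by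
  intro grid
  induction grid with
  | nil => intro _ v; simp
  | cons row grid ih =>
    intro h v
    rw [List.foldl_cons, step_eq ops v row (h row (by simp)),
        ih (fun r hr => h r (by simp [hr])) (fun k => colF (ops.getD k "") k (v k) row)]
    simp

lemma a_eq (grid : List (List Int)) (ops : List String) :
    sum_the_columns grid ops
      = ((List.range ops.length).map (fun k =>
          grid.foldl (colF (ops.getD k "") k)
            (if ops.getD k "" == "+" then 0 else 1))).sum := by
  unfold sum_the_columns
  rw [PySem.List.foldl_add, PySem.List.enumerate_eq_map_pyRange ops ""]
  simp only [PySem.List.len_eq]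
  rw [PySem.List.pyRange_zero_nat ops.length]
  simp only [List.map_map]
  rw [zero_add]
  congr 1
  apply List.map_congr_left
  intro k _
  simp only [Function.comp_apply, PySem.List.pyGetD_natCast]
  by_cases hop : ops.getD k "" == "+"
  · rw [if_pos hop, if_pos hop,
        PySem.List.foldl_pyRange_zero_pyGetD' grid [] (fun q row => q + row.getD k 0) 0]
    have hcol : colF (ops.getD k "") k = fun q row => q + row.getD k 0 := by
      funext q row
      simp only [List.getD_eq_getElem?_getD] at hop
      simp [colF, List.getD_eq_getElem?_getD, hop]
    rw [hcol]
  · rw [if_neg hop, if_neg hop,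
        PySem.List.foldl_pyRange_zero_pyGetD' grid [] (fun q row => q * row.getD k 0) 1]
    have hcol : colF (ops.getD k "") k = fun q row => q * row.getD k 0 := by
      funext q row
      simp only [List.getD_eq_getElem?_getD] at hop
      simp [colF, List.getD_eq_getElem?_getD, hop]
    rw [hcol]

lemma b_eq (grid : List (List Int)) (ops : List String)
    (h : ∀ row ∈ grid, ops.length ≤ row.length) :
    sum_the_columns_alt grid ops
      = ((List.range ops.length).map (fun k =>
          grid.foldl (colF (ops.getD k "") k)
            (if ops.getD k "" == "+" then 0 else 1))).sum := by
  unfold sum_the_columns_alt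
  rw [map_eq_map_range (fun op => if op == "+" then (0 : Int) else 1) ops ""]
  rw [fold_eq ops grid h (fun k => if ops.getD k "" == "+" then 0 else 1)]


-- ===== VERDICT (by name: the statement is the Claim_ definition above) =====
theorem sum_the_columns_spec : Claim_equal_sum_the_columns := by
  intro grid ops _ hpre
  unfold Spec_sum_the_columns
  rw [a_eq, b_eq grid ops hpre]
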